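-- pv_equiv track=rewrite | github.com/HermioneQiu/KK | RecommenderRatingPrediction/FeatureAnalysis/bhvAnalysis.py | sortDictValue
-- ===== SOURCE A (Python) =====
-- def sortDictValue(Dict):
--     sortDict = dict()
--     valList = []
--     for key in Dict.keys():
--         valList.append(Dict[key])
--     sortValList = sorted(valList,reverse=True)
--     tmpList = []
--     # 1 stands for the highest rank
--     tmpIndex =0
--     tmpVal = 0
--     for val in sortValList:
--         for key in Dict.keys():
--             if (val == Dict[key]) &(key not in tmpList):
--                 tmpList.append(key)
--                 if (tmpVal!=val):
--                     tmpIndex += 1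
--                 sortDict[key]=[val,tmpIndex]
--                 tmpVal = val
--     return sortDict
-- ===== SOURCE B (Python) =====
-- def sortDictValue(Dict):
--     # group keys by value in one pass, then rank the distinct values once (descending)
--     groups = {}
--     for key, val in Dict.items():
--         groups.setdefault(val, []).append(key)
--     sortDict = {}
--     rank = 0
--     for val in sorted(groups, reverse=True):
--         rank += 1
--         for key in groups[val]:
--             sortDict[key] = [val, rank]
--     return sortDict
-- ===== Notes on version B (the rewrite author's own statement) =====
-- stated objective: faster
-- what changed: Instead of A's sort of all values followed by a rescan of every key for every sorted value, B groups keys by value in one pass, sorts only the distinct values once, and emits ranks in a single linear sweep.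
-- intended difference: On non-empty dicts whose maximum value is 0, A's leftover tmpVal=0 initialisation makes every dense rank start at 0 (e.g. {'a':0,'b':-1} -> {'a':[0,0],'b':[-1,1]}), while B returns ranks starting at 1 ({'a':[0,1],'b':[-1,2]}) as A's own comment '1 stands for the highest rank' intends. — e.g. on sortDictValue([("a", 0), ("b", -1)]): A returns [("a", [0, 0]), ("b", [-1, 1])], B returns [("a", [0, 1]), ("b", [-1, 2])]
import Mathlib
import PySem

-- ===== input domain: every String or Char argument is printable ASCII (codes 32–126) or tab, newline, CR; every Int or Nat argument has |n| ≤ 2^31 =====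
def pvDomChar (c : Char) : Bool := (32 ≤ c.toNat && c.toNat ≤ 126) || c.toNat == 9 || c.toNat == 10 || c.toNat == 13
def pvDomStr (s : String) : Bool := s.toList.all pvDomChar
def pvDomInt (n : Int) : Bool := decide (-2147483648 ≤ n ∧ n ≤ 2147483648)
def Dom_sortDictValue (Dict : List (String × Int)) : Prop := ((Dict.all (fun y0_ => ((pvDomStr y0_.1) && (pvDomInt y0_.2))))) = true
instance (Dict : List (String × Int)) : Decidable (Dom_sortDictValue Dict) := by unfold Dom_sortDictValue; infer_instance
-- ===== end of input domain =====

-- B groups keys by value in one pass and sorts only the distinct values, instead of A's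
-- sort of all values followed by a rescan of every key for every sorted value (objective: faster).

-- ===== PORT A =====
def sortDictValue (Dict : List (String × Int)) : List (String × List Int) :=
  let d := PySem.Dict.ofList Dict
  let valList : List Int := d.keys.foldl (fun acc key => acc ++ [d.getD key 0]) []
  let sortValList := PySem.List.sorted valList (fun v => v) true
  let fin := sortValList.foldl (fun st val =>
      d.keys.foldl (fun (st : PySem.Dict String (List Int) × List String × Int × Int) key =>
        if (d.getD key 0 == val) && !(st.2.1.contains key) then
          let tmpList := st.2.1 ++ [key]
          let tmpIndex := if st.2.2.2 != val then st.2.2.1 + 1 else st.2.2.1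
          (st.1.insert key [val, tmpIndex], tmpList, tmpIndex, val)
        else st) st)
    ((PySem.Dict.empty : PySem.Dict String (List Int)), ([] : List String), (0 : Int), (0 : Int))
  fin.1.items

-- ===== PORT B =====
def sortDictValue_alt (Dict : List (String × Int)) : List (String × List Int) :=
  let d := PySem.Dict.ofList Dict
  let groups : PySem.Dict Int (List String) :=
    d.items.foldl (fun g p => g.modify p.2 [] (· ++ [p.1])) PySem.Dict.empty
  let fin := (PySem.List.sorted groups.keys (fun v => v) true).foldl
    (fun (st : PySem.Dict String (List Int) × Int) val =>
      let rank := st.2 + 1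
      ((groups.getD val []).foldl (fun out key => out.insert key [val, rank]) st.1, rank))
    ((PySem.Dict.empty : PySem.Dict String (List Int)), (0 : Int))
  fin.1.items

-- ===== PRECONDITION & SPEC =====
-- On non-empty dicts whose maximum value is 0, A's leftover tmpVal=0 initialisation makes every
-- dense rank start at 0, while B returns ranks starting at 1 as A's own comment
-- "1 stands for the highest rank" intends.
def D_sortDictValue (Dict : List (String × Int)) : Prop :=
  (PySem.Dict.ofList Dict).items ≠ [] ∧
    (∀ p ∈ (PySem.Dict.ofList Dict).items, p.2 ≤ 0) ∧
    (0 : Int) ∈ ((PySem.Dict.ofList Dict).items.map (fun p => p.2))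
instance (Dict : List (String × Int)) : Decidable (D_sortDictValue Dict) := by
  unfold D_sortDictValue; infer_instance

def Spec_sortDictValue (Dict : List (String × Int)) (out : List (String × List Int)) : Prop :=
  ¬ D_sortDictValue Dict → out = sortDictValue_alt Dict
instance (Dict : List (String × Int)) (out : List (String × List Int)) :
    Decidable (Spec_sortDictValue Dict out) := by unfold Spec_sortDictValue; infer_instance

def pvDiffWitness_sortDictValue : (List (String × Int)) := [("a", 0), ("b", -1)]
def pvDiffWitnessOut_sortDictValue : (List (String × List Int)) × (List (String × List Int)) :=
  ([("a", [0, 0]), ("b", [-1, 1])], [("a", [0, 1]), ("b", [-1, 2])])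

-- ===== CLAIM (what is proved, stated in full; the proofs are below) =====
def Claim_unchanged_sortDictValue : Prop := ∀ (Dict : List (String × Int)),
  Dom_sortDictValue Dict → Spec_sortDictValue Dict (sortDictValue Dict)
def Claim_changed_sortDictValue : Prop :=
  Dom_sortDictValue (pvDiffWitness_sortDictValue) ∧ D_sortDictValue (pvDiffWitness_sortDictValue) ∧
  sortDictValue (pvDiffWitness_sortDictValue) = pvDiffWitnessOut_sortDictValue.1 ∧
  sortDictValue_alt (pvDiffWitness_sortDictValue) = pvDiffWitnessOut_sortDictValue.2 ∧
  pvDiffWitnessOut_sortDictValue.1 ≠ pvDiffWitnessOut_sortDictValue.2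
def Claim_exact_sortDictValue : Prop := ∀ (Dict : List (String × Int)),
  Dom_sortDictValue Dict → D_sortDictValue Dict → sortDictValue Dict ≠ sortDictValue_alt Dict

-- ===== LEMMAS AND PROOFS =====

def pvIStep (v : Int) (st : PySem.Dict String (List Int) × List String × Int × Int)
    (p : String × Int) : PySem.Dict String (List Int) × List String × Int × Int :=
  if (p.2 == v) && !(st.2.1.contains p.1) then
    let tmpList := st.2.1 ++ [p.1]
    let tmpIndex := if st.2.2.2 != v then st.2.2.1 + 1 else st.2.2.1
    (st.1.insert p.1 [v, tmpIndex], tmpList, tmpIndex, v)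
  else st

def pvInit : PySem.Dict String (List Int) × List String × Int × Int :=
  (PySem.Dict.empty, [], 0, 0)

lemma pvA_model (Dict : List (String × Int)) :
    sortDictValue Dict =
      (((PySem.List.sorted ((PySem.Dict.ofList Dict).items.map (fun p => p.2)) (fun v => v) true).foldl
          (fun st v => (PySem.Dict.ofList Dict).items.foldl (pvIStep v) st) pvInit)).1.items := by
  unfold sortDictValue pvInit
  have hnd : ((PySem.Dict.ofList Dict).items.map Prod.fst).Nodup := by
    simpa [PySem.Dict.keys] using PySem.Dict.nodup_keys_ofList (κ := String) (ν := Int) Dict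
  have hget : ∀ p ∈ (PySem.Dict.ofList Dict).items,
      (PySem.Dict.ofList Dict).getD p.1 0 = p.2 := by
    intro p hp
    exact PySem.Dict.getD_of_mem_items _ (by simpa using hp)
      (by simpa [PySem.Dict.keys] using hnd) 0
  have hval : (PySem.Dict.ofList Dict).keys.foldl
        (fun acc key => acc ++ [(PySem.Dict.ofList Dict).getD key 0]) []
      = (PySem.Dict.ofList Dict).items.map (fun p => p.2) := by
    rw [PySem.List.foldl_append_singleton_eq_map]
    simp only [PySem.Dict.keys, List.map_map, List.nil_append]
    exact List.map_congr_left (fun p hp => by simpa using hget p hp)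
  have hbody : ∀ (st : PySem.Dict String (List Int) × List String × Int × Int) (val : Int),
      (PySem.Dict.ofList Dict).keys.foldl
        (fun (st : PySem.Dict String (List Int) × List String × Int × Int) key =>
          if ((PySem.Dict.ofList Dict).getD key 0 == val) && !(st.2.1.contains key) then
            (st.1.insert key [val, if st.2.2.2 != val then st.2.2.1 + 1 else st.2.2.1],
             st.2.1 ++ [key], (if st.2.2.2 != val then st.2.2.1 + 1 else st.2.2.1), val)
          else st) st
      = (PySem.Dict.ofList Dict).items.foldl (pvIStep val) st := by
    intro st val
    simp only [PySem.Dict.keys]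
    rw [List.foldl_map]
    refine PySem.List.foldl_congr_mem _ _ _ _ (fun acc p hp => ?_)
    simp only [pvIStep, hget p hp]
  simp only [hval, hbody]

def pvGrp (L : List (String × Int)) (v : Int) : List (String × Int) := L.filter (fun p => p.2 == v)

lemma pv_noop (v : Int) : ∀ (M : List (String × Int))
    (st : PySem.Dict String (List Int) × List String × Int × Int),
    (∀ p ∈ M, p.2 = v → p.1 ∈ st.2.1) → M.foldl (pvIStep v) st = st := by
  intro M
  induction M with
  | nil => intro st _; rfl
  | cons p M ih =>
    intro st h
    have hstep : pvIStep v st p = st := by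
      unfold pvIStep
      by_cases hv : p.2 = v
      · simp [hv, h p (by simp) hv]
      · simp [hv]
    simpa [List.foldl_cons, hstep] using ih st (fun q hq => h q (by simp [hq]))

lemma pv_inner (v : Int) : ∀ (M : List (String × Int))
    (st : PySem.Dict String (List Int) × List String × Int × Int),
    (M.map Prod.fst).Nodup → (∀ p ∈ M, p.2 = v → p.1 ∉ st.2.1) →
    M.foldl (pvIStep v) st =
      (if pvGrp M v = [] then st
       else
        ((pvGrp M v).foldl (fun dd p => dd.insert p.1 [v, if st.2.2.2 != v then st.2.2.1 + 1 else st.2.2.1]) st.1,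
         st.2.1 ++ (pvGrp M v).map (fun p => p.1),
         (if st.2.2.2 != v then st.2.2.1 + 1 else st.2.2.1), v)) := by
  intro M
  induction M with
  | nil => intro st _ _; simp [pvGrp]
  | cons p M ih =>
    intro st hnd hdisj
    have hndM : (M.map Prod.fst).Nodup := by simpa using hnd.of_cons
    by_cases hv : p.2 = v
    · have hp1 : p.1 ∉ st.2.1 := hdisj p (by simp) hv
      set i := (if st.2.2.2 != v then st.2.2.1 + 1 else st.2.2.1) with hi
      have hstep : pvIStep v st p = (st.1.insert p.1 [v, i], st.2.1 ++ [p.1], i, v) := by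
        unfold pvIStep
        simp [hv, hp1, hi]
      have hgrp : pvGrp (p :: M) v = p :: pvGrp M v := by simp [pvGrp, hv]
      have hdisj' : ∀ q ∈ M, q.2 = v → q.1 ∉ st.2.1 ++ [p.1] := by
        intro q hq hq2
        have hqp : q.1 ≠ p.1 := by
          intro he
          have hmem : p.1 ∈ M.map Prod.fst := he ▸ List.mem_map_of_mem (f := Prod.fst) hq
          exact (List.nodup_cons.1 (by simpa using hnd)).1 hmem
        simp [hdisj q (by simp [hq]) hq2, hqp]
      rw [List.foldl_cons, hstep, ih _ hndM hdisj']
      by_cases hg : pvGrp M v = []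
      · simp [hg, hgrp]
      · simp only [hg, hgrp]
        rw [if_neg (by simp : ¬(p :: pvGrp M v) = [])]
        simp [List.foldl_cons]
    · have hstep : pvIStep v st p = st := by unfold pvIStep; simp [hv]
      have hgrp : pvGrp (p :: M) v = pvGrp M v := by simp [pvGrp, hv]
      rw [List.foldl_cons, hstep, ih _ hndM (fun q hq => hdisj q (by simp [hq])), hgrp]

lemma pv_dedup_cons {x : Int} {ys : List Int} :
    PySem.List.dedup (x :: ys) = x :: (PySem.List.dedup ys).filter (fun y => !(y == x)) := by
  rw [PySem.List.dedup_eq_ofList, PySem.List.dedup_eq_ofList]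
  rw [show (x :: ys) = [x] ++ ys from rfl, PySem.Set.ofList_append,
    show PySem.Set.ofList [x] = [x] from rfl, PySem.Set.update_eq_append_filter]
  simp only [List.singleton_append, List.cons.injEq, true_and]
  refine List.filter_congr (fun y hy => ?_)
  simp only [PySem.Set.contains, List.contains_eq_mem, List.mem_singleton]
  rw [(beq_eq_decide y x).symm]

def pvGStep (L : List (String × Int)) (st : PySem.Dict String (List Int) × List String × Int × Int)
    (v : Int) : PySem.Dict String (List Int) × List String × Int × Int :=
  ((pvGrp L v).foldl (fun dd p => dd.insert p.1 [v, if st.2.2.2 != v then st.2.2.1 + 1 else st.2.2.1]) st.1,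
   st.2.1 ++ (pvGrp L v).map (fun p => p.1),
   (if st.2.2.2 != v then st.2.2.1 + 1 else st.2.2.1), v)

lemma pv_tmp (L : List (String × Int)) : ∀ (D : List Int) st,
    (D.foldl (pvGStep L) st).2.1 = st.2.1 ++ D.flatMap (fun v => (pvGrp L v).map (fun p => p.1)) := by
  intro D
  induction D with
  | nil => intro st; simp
  | cons v D ih => intro st; rw [List.foldl_cons, ih]; simp [pvGStep]

lemma pv_fst_inj {L : List (String × Int)} (h : (L.map Prod.fst).Nodup)
    {p q : String × Int} (hp : p ∈ L) (hq : q ∈ L) (he : p.1 = q.1) : p = q := by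
  by_contra hne
  have h2 : L.Pairwise (fun a b => a.1 ≠ b.1) := (List.pairwise_map).1 h
  exact (h2.forall (fun {a b} hab => (Ne.symm hab)) hp hq hne) he

lemma pv_A1 (L : List (String × Int)) (hnd : (L.map Prod.fst).Nodup) :
    ∀ (xs : List Int) (D : List Int), (∀ v ∈ xs, v ∈ L.map (fun p => p.2)) → D.Nodup →
    xs.foldl (fun st v => L.foldl (pvIStep v) st) (D.foldl (pvGStep L) pvInit) =
    (D ++ (PySem.List.dedup xs).filter (fun v => !(decide (v ∈ D)))).foldl (pvGStep L) pvInit := by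
  intro xs
  induction xs with
  | nil => intro D _ _; simp [PySem.List.dedup, PySem.Set.ofList]
  | cons x rest ih =>
    intro D hxs hD
    rw [List.foldl_cons, pv_dedup_cons]
    by_cases hxD : x ∈ D
    · -- duplicate of an already processed value: inner loop is a no-op
      have hsat : ∀ p ∈ L, p.2 = x → p.1 ∈ (D.foldl (pvGStep L) pvInit).2.1 := by
        intro p hp hpx
        rw [pv_tmp]
        refine List.mem_append_right _ (List.mem_flatMap.2 ⟨x, hxD, ?_⟩)
        exact List.mem_map_of_mem (by simp [pvGrp, hp, hpx])
      rw [pv_noop x L _ hsat, ih D (fun v hv => hxs v (by simp [hv])) hD]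
      congr 1
      congr 1
      rw [List.filter_cons_of_neg (by simp [hxD]), List.filter_filter]
      refine List.filter_congr (fun v hv => ?_)
      by_cases h2 : v = x
      · subst h2; simp [hxD]
      · by_cases h1 : v ∈ D <;> simp [h1, h2]
    · -- fresh value: the inner loop processes its whole group
      have hdisj : ∀ p ∈ L, p.2 = x → p.1 ∉ (D.foldl (pvGStep L) pvInit).2.1 := by
        intro p hp hpx hmem
        rw [pv_tmp] at hmem
        rcases List.mem_append.1 hmem with h | h
        · simp [pvInit] at h
        · rcases List.mem_flatMap.1 h with ⟨w, hwD, hw⟩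
          rcases List.mem_map.1 hw with ⟨q, hq, hq1⟩
          have hqL : q ∈ L := List.mem_of_mem_filter hq
          have hq2 : q.2 = w := by simpa [pvGrp] using (List.mem_filter.1 hq).2
          have := pv_fst_inj hnd hqL hp hq1
          exact hxD (by rw [← hpx, ← this, hq2]; exact hwD)
      have hgrpne : pvGrp L x ≠ [] := by
        rcases List.mem_map.1 (hxs x (by simp)) with ⟨p, hp, hpx⟩
        intro hempty
        have : p ∈ pvGrp L x := by simp [pvGrp, hp, hpx]
        simp [hempty] at this
      rw [pv_inner x L _ hnd hdisj, if_neg hgrpne]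
      have hstep : (((pvGrp L x).foldl (fun dd p => dd.insert p.1 [x,
            if (D.foldl (pvGStep L) pvInit).2.2.2 != x then (D.foldl (pvGStep L) pvInit).2.2.1 + 1
            else (D.foldl (pvGStep L) pvInit).2.2.1]) (D.foldl (pvGStep L) pvInit).1,
          (D.foldl (pvGStep L) pvInit).2.1 ++ (pvGrp L x).map (fun p => p.1),
          (if (D.foldl (pvGStep L) pvInit).2.2.2 != x then (D.foldl (pvGStep L) pvInit).2.2.1 + 1
            else (D.foldl (pvGStep L) pvInit).2.2.1), x))
          = (D ++ [x]).foldl (pvGStep L) pvInit := by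
        rw [List.foldl_append]
        simp [pvGStep]
      rw [hstep, ih (D ++ [x]) (fun v hv => hxs v (by simp [hv]))
        (by simp [List.nodup_append, hD]; exact fun a ha he => hxD (he ▸ ha))]
      congr 1
      rw [List.filter_cons_of_pos (by simp [hxD]), List.filter_filter, List.append_assoc]
      congr 1
      simp only [List.singleton_append, List.cons.injEq, true_and]
      refine List.filter_congr (fun v hv => ?_)
      by_cases h1 : v ∈ D <;> by_cases h2 : v = x <;> simp [h1, h2]

def pvOutFor (L : List (String × Int)) (D : List Int) (c : Int) : List (String × List Int) :=
  (PySem.List.enumerate D 1).flatMap (fun e => (pvGrp L e.2).map (fun p => (p.1, [e.2, e.1 - c])))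

def pvC (D : List Int) : Int := if D.head? = some 0 then 1 else 0

lemma pvOutFor_keys (L : List (String × Int)) (D : List Int) (c : Int) :
    (pvOutFor L D c).map Prod.fst = D.flatMap (fun v => (pvGrp L v).map (fun p => p.1)) := by
  unfold pvOutFor
  rw [List.map_flatMap]
  conv_rhs => rw [← PySem.List.map_snd_enumerate D 1, List.flatMap_map]
  simp only [List.map_map]
  exact congrFun (congrArg List.flatMap (funext fun a => List.map_congr_left fun p _ => rfl)) _

lemma pv_key_disj {L : List (String × Int)} (hnd : (L.map Prod.fst).Nodup) {v : Int} {E : List Int}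
    (hv : v ∉ E) {p : String × Int} (hp : p ∈ pvGrp L v) :
    p.1 ∉ E.flatMap (fun w => (pvGrp L w).map (fun q => q.1)) := by
  intro hmem
  rcases List.mem_flatMap.1 hmem with ⟨w, hwE, hw⟩
  rcases List.mem_map.1 hw with ⟨q, hq, hq1⟩
  have hqL : q ∈ L := List.mem_of_mem_filter hq
  have hq2 : q.2 = w := by simpa [pvGrp] using (List.mem_filter.1 hq).2
  have hpL : p ∈ L := List.mem_of_mem_filter hp
  have hp2 : p.2 = v := by simpa [pvGrp] using (List.mem_filter.1 hp).2
  have := pv_fst_inj hnd hqL hpL hq1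
  exact hv (by rw [← hp2, ← this, hq2]; exact hwE)

lemma pv_grpK_nodup {L : List (String × Int)} (hnd : (L.map Prod.fst).Nodup) (v : Int) :
    ((pvGrp L v).map (fun p => p.1)).Nodup :=
  hnd.sublist (List.Sublist.map _ List.filter_sublist)

lemma pvC_append {E : List Int} {v : Int} (h : E ≠ []) : pvC (E ++ [v]) = pvC E := by
  unfold pvC
  cases E with
  | nil => exact absurd rfl h
  | cons a E => simp

lemma pvOutFor_append (L : List (String × Int)) (E : List Int) (v c : Int) :
    pvOutFor L (E ++ [v]) c =
      pvOutFor L E c ++ (pvGrp L v).map (fun p => (p.1, [v, (1 + (E.length : Int)) - c])) := by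
  unfold pvOutFor
  rw [PySem.List.enumerate_append, List.flatMap_append]
  simp [PySem.List.enumerate]

lemma pv_gstep_mk {L : List (String × Int)} (hnd : (L.map Prod.fst).Nodup)
    {E : List Int} {v : Int} (hvE : v ∉ E) (c i : Int) :
    (pvGrp L v).foldl (fun dd p => dd.insert p.1 [v, i]) (PySem.Dict.mk (pvOutFor L E c)) =
      PySem.Dict.mk (pvOutFor L E c ++ (pvGrp L v).map (fun p => (p.1, [v, i]))) := by
  apply PySem.Dict.ext
  have hfresh : ∀ p ∈ pvGrp L v,
      (PySem.Dict.mk (pvOutFor L E c)).contains p.1 = false := by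
    intro p hp
    rw [PySem.Dict.contains_eq_decide_mem_keys]
    simp only [decide_eq_false_iff_not, PySem.Dict.keys]
    show p.1 ∉ (pvOutFor L E c).map Prod.fst
    rw [pvOutFor_keys]
    exact pv_key_disj hnd hvE hp
  rw [PySem.Dict.items_foldl_insert_fresh (pvGrp L v) (fun p => p.1) (fun p => [v, i]) _
    hfresh (pv_grpK_nodup hnd v)]

lemma pv_A2 (L : List (String × Int)) (hnd : (L.map Prod.fst).Nodup) :
    ∀ (D : List Int), D.Nodup →
    D.foldl (pvGStep L) pvInit =
      (PySem.Dict.mk (pvOutFor L D (pvC D)),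
       D.flatMap (fun v => (pvGrp L v).map (fun p => p.1)),
       (D.length : Int) - pvC D, D.getLastD 0) := by
  intro D
  induction D using List.reverseRecOn with
  | nil =>
    intro _
    show pvInit = _
    unfold pvInit pvOutFor pvC
    simp [PySem.List.enumerate]
    rfl
  | append_singleton E v ih =>
    intro hnd'
    have hE : E.Nodup := hnd'.sublist (List.sublist_append_left E [v])
    have hvE : v ∉ E := by
      have h2 : (v :: E).Nodup := by simpa using List.nodup_append_comm.mp hnd'
      exact (List.nodup_cons.1 h2).1
    rw [List.foldl_append, ih hE, List.foldl_cons, List.foldl_nil]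
    have hlast : E ≠ [] → E.getLastD 0 ≠ v := by
      intro hEnil h
      have hmem : E.getLastD 0 ∈ E := by
        cases E with
        | nil => exact absurd rfl hEnil
        | cons a E =>
          have h2 : (a :: E).getLast? = some ((a :: E).getLast (by simp)) :=
            List.getLast?_eq_some_getLast (by simp)
          simp [List.getLastD_eq_getLast?, h2, List.getLast_mem]
      exact hvE (h ▸ hmem)
    have hi : (if (E.getLastD 0 != v) = true then ((E.length : Int) - pvC E) + 1
          else (E.length : Int) - pvC E)
        = (1 + (E.length : Int)) - pvC (E ++ [v]) := by
      by_cases hEnil : E = []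
      · subst hEnil
        by_cases hv0 : v = 0 <;> (simp [pvC, hv0, List.getLastD]; try omega)
      · rw [pvC_append hEnil]
        simp only [bne_iff_ne, ne_eq, if_pos (hlast hEnil)]
        omega
    have houtpre : pvOutFor L E (pvC E) = pvOutFor L E (pvC (E ++ [v])) := by
      by_cases hEnil : E = []
      · subst hEnil; simp [pvOutFor, PySem.List.enumerate]
      · rw [pvC_append hEnil]
    unfold pvGStep
    simp only []
    rw [hi, houtpre, pv_gstep_mk hnd hvE, ← pvOutFor_append]
    refine Prod.ext rfl (Prod.ext ?_ (Prod.ext ?_ ?_))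
    · simp
    · simp only [List.length_append, List.length_cons, List.length_nil]
      push_cast
      ring
    · simp [List.getLastD_eq_getLast?]

lemma pvB_model (Dict : List (String × Int)) :
    sortDictValue_alt Dict =
      ((PySem.List.sorted (PySem.Set.ofList ((PySem.Dict.ofList Dict).items.map (fun p => p.2)))
          (fun v => v) true).foldl
        (fun (st : PySem.Dict String (List Int) × Int) v =>
          (((pvGrp (PySem.Dict.ofList Dict).items v).map (fun p => p.1)).foldl
              (fun out k => out.insert k [v, st.2 + 1]) st.1, st.2 + 1))
        (PySem.Dict.empty, 0)).1.items := by
  unfold sortDictValue_alt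
  have hkeys : ((PySem.Dict.ofList Dict).items.foldl
        (fun g p => g.modify p.2 [] (· ++ [p.1])) (PySem.Dict.empty : PySem.Dict Int (List String))).keys
      = PySem.Set.ofList ((PySem.Dict.ofList Dict).items.map (fun p => p.2)) := by
    rw [PySem.Dict.keys_foldl_modify_key (key := fun (p : String × Int) => p.2)
      (d0 := ([] : List String))
      (f := fun (_ : PySem.Dict Int (List String)) (p : String × Int) (cur : List String) => cur ++ [p.1])]
    rw [show (PySem.Dict.empty : PySem.Dict Int (List String)).keys = [] from rfl,
      PySem.Set.update_nil_left]
  have hgetD : ∀ v : Int, ((PySem.Dict.ofList Dict).items.foldl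
        (fun g p => g.modify p.2 [] (· ++ [p.1])) (PySem.Dict.empty : PySem.Dict Int (List String))).getD v []
      = (pvGrp (PySem.Dict.ofList Dict).items v).map (fun p => p.1) := by
    intro v
    rw [show ((PySem.Dict.ofList Dict).items.foldl
          (fun g p => g.modify p.2 [] (· ++ [p.1])) (PySem.Dict.empty : PySem.Dict Int (List String)))
        = (((PySem.Dict.ofList Dict).items.map (fun p => (p.2, p.1))).foldl
          (fun g q => g.modify q.1 [] (· ++ [q.2])) PySem.Dict.empty) from
        (by rw [List.foldl_map])]
    rw [PySem.Dict.getD_foldl_modify_append]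
    rw [List.filter_map, List.map_map]
    simp [pvGrp, Function.comp_def]
  simp only [hkeys, hgetD]

lemma pv_B2 (L : List (String × Int)) (hnd : (L.map Prod.fst).Nodup) :
    ∀ (D : List Int), D.Nodup →
    D.foldl (fun (st : PySem.Dict String (List Int) × Int) v =>
        (((pvGrp L v).map (fun p => p.1)).foldl (fun out k => out.insert k [v, st.2 + 1]) st.1, st.2 + 1))
      (PySem.Dict.empty, 0) =
      (PySem.Dict.mk (pvOutFor L D 0), (D.length : Int)) := by
  intro D
  induction D using List.reverseRecOn with
  | nil =>
    intro _
    show (PySem.Dict.empty, (0 : Int)) = _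
    unfold pvOutFor
    simp [PySem.List.enumerate]
    rfl
  | append_singleton E v ih =>
    intro hnd'
    have hE : E.Nodup := hnd'.sublist (List.sublist_append_left E [v])
    have hvE : v ∉ E := by
      have h2 : (v :: E).Nodup := by simpa using List.nodup_append_comm.mp hnd'
      exact (List.nodup_cons.1 h2).1
    rw [List.foldl_append, ih hE, List.foldl_cons, List.foldl_nil]
    have hfresh : ∀ k ∈ (pvGrp L v).map (fun p => p.1),
        (PySem.Dict.mk (pvOutFor L E 0)).contains k = false := by
      intro k hk
      rcases List.mem_map.1 hk with ⟨q, hq, hq1⟩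
      rw [PySem.Dict.contains_eq_decide_mem_keys]
      simp only [decide_eq_false_iff_not, PySem.Dict.keys]
      show k ∉ (pvOutFor L E 0).map Prod.fst
      rw [pvOutFor_keys]
      exact hq1 ▸ pv_key_disj hnd hvE hq
    have hdict : ((pvGrp L v).map (fun p => p.1)).foldl
          (fun out k => out.insert k [v, (E.length : Int) + 1]) (PySem.Dict.mk (pvOutFor L E 0))
        = PySem.Dict.mk (pvOutFor L (E ++ [v]) 0) := by
      apply PySem.Dict.ext
      rw [PySem.Dict.items_foldl_insert_fresh ((pvGrp L v).map (fun p => p.1)) (fun k => k)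
        (fun k => [v, (E.length : Int) + 1]) _ hfresh (by simpa using pv_grpK_nodup hnd v)]
      show pvOutFor L E 0 ++ _ = pvOutFor L (E ++ [v]) 0
      rw [pvOutFor_append, List.map_map]
      congr 1
      refine List.map_congr_left (fun p _ => ?_)
      simp [add_comm]
    refine Prod.ext ?_ ?_
    · exact hdict
    · simp

lemma pv_dedup_sublist : ∀ (xs : List Int), (PySem.List.dedup xs).Sublist xs := by
  intro xs
  induction xs with
  | nil => simp [PySem.List.dedup, PySem.Set.ofList]
  | cons x ys ih =>
    rw [pv_dedup_cons]
    exact List.Sublist.cons₂ x (List.filter_sublist.trans ih)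

lemma pv_dvA_pairwise (vals : List Int) :
    (PySem.List.dedup (PySem.List.sorted vals (fun v => v) true)).Pairwise (fun a b => b < a) := by
  have h1 := PySem.List.sorted_pairwise_rev vals (fun v => v)
  have h2 := List.Pairwise.sublist (pv_dedup_sublist _) h1
  have h3 : (PySem.List.dedup (PySem.List.sorted vals (fun v => v) true)).Pairwise (· ≠ ·) :=
    PySem.List.nodup_dedup _
  exact (h2.and h3).imp (fun h => lt_of_le_of_ne h.1 (Ne.symm h.2))

lemma pv_dv (vals : List Int) :
    PySem.List.sorted (PySem.Set.ofList vals) (fun v => v) true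
      = PySem.List.dedup (PySem.List.sorted vals (fun v => v) true) := by
  apply PySem.List.sorted_rev_eq_of_perm_of_pairwise_gt
  · refine (List.perm_ext_iff_of_nodup (PySem.List.nodup_dedup _) (PySem.Set.nodup_ofList _)).2 ?_
    intro a
    rw [PySem.List.mem_dedup, PySem.List.mem_sorted, PySem.Set.mem_ofList]
  · exact pv_dvA_pairwise vals

lemma pvA_closed (Dict : List (String × Int)) :
    sortDictValue Dict =
      pvOutFor (PySem.Dict.ofList Dict).items
        (PySem.List.dedup (PySem.List.sorted ((PySem.Dict.ofList Dict).items.map (fun p => p.2))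
          (fun v => v) true))
        (pvC (PySem.List.dedup (PySem.List.sorted ((PySem.Dict.ofList Dict).items.map (fun p => p.2))
          (fun v => v) true))) := by
  have hnd : ((PySem.Dict.ofList Dict).items.map Prod.fst).Nodup := by
    simpa [PySem.Dict.keys] using PySem.Dict.nodup_keys_ofList (κ := String) (ν := Int) Dict
  rw [pvA_model]
  have h1 := pv_A1 (PySem.Dict.ofList Dict).items hnd
    (PySem.List.sorted ((PySem.Dict.ofList Dict).items.map (fun p => p.2)) (fun v => v) true) []
    (fun v hv => (PySem.List.mem_sorted _ _ _ v).1 hv) List.nodup_nil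
  simp only [List.foldl_nil, List.nil_append, List.not_mem_nil, decide_false, Bool.not_false,
    List.filter_true] at h1
  rw [h1, pv_A2 _ hnd _ (PySem.List.nodup_dedup _)]

lemma pvB_closed (Dict : List (String × Int)) :
    sortDictValue_alt Dict =
      pvOutFor (PySem.Dict.ofList Dict).items
        (PySem.List.dedup (PySem.List.sorted ((PySem.Dict.ofList Dict).items.map (fun p => p.2))
          (fun v => v) true)) 0 := by
  have hnd : ((PySem.Dict.ofList Dict).items.map Prod.fst).Nodup := by
    simpa [PySem.Dict.keys] using PySem.Dict.nodup_keys_ofList (κ := String) (ν := Int) Dict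
  rw [pvB_model, pv_dv, pv_B2 _ hnd _ (PySem.List.nodup_dedup _)]

lemma pv_head_of_D {Dict : List (String × Int)} (h : D_sortDictValue Dict) :
    (PySem.List.dedup (PySem.List.sorted ((PySem.Dict.ofList Dict).items.map (fun p => p.2))
      (fun v => v) true)).head? = some 0 := by
  obtain ⟨hne, hle, hmem⟩ := h
  have hmemdv : (0 : Int) ∈ PySem.List.dedup (PySem.List.sorted
      ((PySem.Dict.ofList Dict).items.map (fun p => p.2)) (fun v => v) true) := by
    rw [PySem.List.mem_dedup, PySem.List.mem_sorted]; exact hmem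
  cases hdv : PySem.List.dedup (PySem.List.sorted
      ((PySem.Dict.ofList Dict).items.map (fun p => p.2)) (fun v => v) true) with
  | nil => rw [hdv] at hmemdv; simp at hmemdv
  | cons h0 t =>
    have hpw := pv_dvA_pairwise ((PySem.Dict.ofList Dict).items.map (fun p => p.2))
    rw [hdv] at hpw hmemdv
    have h0mem : h0 ∈ (PySem.Dict.ofList Dict).items.map (fun p => p.2) := by
      have h2 : h0 ∈ PySem.List.dedup (PySem.List.sorted
          ((PySem.Dict.ofList Dict).items.map (fun p => p.2)) (fun v => v) true) := by
        rw [hdv]; simp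
      rwa [PySem.List.mem_dedup, PySem.List.mem_sorted] at h2
    rcases List.mem_map.1 h0mem with ⟨p, hp, hp2⟩
    have hh0 : h0 ≤ 0 := hp2 ▸ hle p hp
    rcases List.mem_cons.1 hmemdv with h | h
    · simp [← h]
    · have := (List.pairwise_cons.1 hpw).1 0 h
      omega

lemma pv_c_eq_zero {Dict : List (String × Int)} (h : ¬ D_sortDictValue Dict) :
    pvC (PySem.List.dedup (PySem.List.sorted ((PySem.Dict.ofList Dict).items.map (fun p => p.2))
      (fun v => v) true)) = 0 := by
  unfold pvC
  split_ifs with hh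
  · exfalso
    apply h
    cases hdv : PySem.List.dedup (PySem.List.sorted
        ((PySem.Dict.ofList Dict).items.map (fun p => p.2)) (fun v => v) true) with
    | nil => rw [hdv] at hh; simp at hh
    | cons h0 t =>
      rw [hdv] at hh
      have hh0 : h0 = 0 := by simpa using hh
      subst hh0
      have hpw := pv_dvA_pairwise ((PySem.Dict.ofList Dict).items.map (fun p => p.2))
      rw [hdv] at hpw
      have hmemv : (0 : Int) ∈ (PySem.Dict.ofList Dict).items.map (fun p => p.2) := by
        have h2 : (0 : Int) ∈ PySem.List.dedup (PySem.List.sorted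
            ((PySem.Dict.ofList Dict).items.map (fun p => p.2)) (fun v => v) true) := by
          rw [hdv]; simp
        rwa [PySem.List.mem_dedup, PySem.List.mem_sorted] at h2
    -- components of D_
      refine ⟨?_, ?_, hmemv⟩
      · rcases List.mem_map.1 hmemv with ⟨p, hp, _⟩
        intro hnil
        rw [hnil] at hp
        simp at hp
      · intro p hp
        have hpv : p.2 ∈ PySem.List.dedup (PySem.List.sorted
            ((PySem.Dict.ofList Dict).items.map (fun p => p.2)) (fun v => v) true) := by
          rw [PySem.List.mem_dedup, PySem.List.mem_sorted]
          exact List.mem_map_of_mem hp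
        rw [hdv] at hpv
        rcases List.mem_cons.1 hpv with h2 | h2
        · omega
        · have := (List.pairwise_cons.1 hpw).1 p.2 h2
          omega
  · rfl

theorem pv_unchanged (Dict : List (String × Int)) (h : ¬ D_sortDictValue Dict) :
    sortDictValue Dict = sortDictValue_alt Dict := by
  rw [pvA_closed, pvB_closed, pv_c_eq_zero h]

theorem pv_tight_core {Dict : List (String × Int)} (hD : D_sortDictValue Dict) :
    sortDictValue Dict ≠ sortDictValue_alt Dict := by
  have hhead := pv_head_of_D hD
  obtain ⟨hne, hle, hmem⟩ := hD
  intro heq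
  rw [pvA_closed, pvB_closed] at heq
  obtain ⟨t, hdv⟩ : ∃ t, PySem.List.dedup (PySem.List.sorted
      ((PySem.Dict.ofList Dict).items.map (fun p => p.2)) (fun v => v) true) = 0 :: t := by
    cases hdv : PySem.List.dedup (PySem.List.sorted
        ((PySem.Dict.ofList Dict).items.map (fun p => p.2)) (fun v => v) true) with
    | nil => rw [hdv] at hhead; simp at hhead
    | cons h0 t =>
      rw [hdv] at hhead
      have h0 : h0 = 0 := by simpa using hhead
      exact ⟨t, by rw [h0]⟩
  obtain ⟨q, G, hgrp⟩ : ∃ q G, pvGrp (PySem.Dict.ofList Dict).items 0 = q :: G := by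
    rcases List.mem_map.1 hmem with ⟨p, hp, hp2⟩
    cases hgrp : pvGrp (PySem.Dict.ofList Dict).items 0 with
    | nil =>
      exfalso
      have h2 : p ∈ pvGrp (PySem.Dict.ofList Dict).items 0 := by simp [pvGrp, hp, hp2]
      rw [hgrp] at h2
      simp at h2
    | cons q G => exact ⟨q, G, rfl⟩
  have hc : pvC (0 :: t) = 1 := by simp [pvC]
  rw [hdv, hc] at heq
  unfold pvOutFor at heq
  rw [PySem.List.enumerate_cons] at heq
  simp only [List.flatMap_cons, hgrp, List.map_cons, List.cons_append] at heq
  have hheads := congrArg List.head? heq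
  simp at hheads

-- ===== VERDICT (by name: the statement is the Claim_ definition above) =====
theorem sortDictValue_spec : Claim_unchanged_sortDictValue := by
  intro Dict _ hnD
  exact pv_unchanged Dict hnD
theorem sortDictValue_changed : Claim_changed_sortDictValue := by
  unfold Claim_changed_sortDictValue; decide
theorem sortDictValue_tight : Claim_exact_sortDictValue := by
  intro Dict _ hD
  exact pv_tight_core hD
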